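-- pv_equiv track=rewrite | github.com/samuelePasquale17/ECE464_Project2 | main.py | get_node_level
-- ===== SOURCE A (Python) =====
-- def get_node_level(levelization_dict, input_nodes):
--     """
--     Function that given the input nodes of the current gate, checks all the levels and return the level
--     as the max{level of input nodes} + 1. If the level is unknown -1 is used
--     :param levelization_dict: dictionary that maps the node and its level
--     :param input_nodes: list with input nodes
--     :return: -1 if at least one input level is unknown, max{level of input nodes} + 1 as level of the current node
--     """
--     # list that contains the levels for all the fanin nodes
--     lvls = []
--     # run over input nodes
--     for input_node in input_nodes:
--         # check if input node is in the levelization dictionary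
--         if input_node in levelization_dict:
--             # add level
--             lvls.append(levelization_dict[input_node])
--         else:
--             # append -1 if the input node is not in the levelization dictionary
--             lvls.append(-1)
--
--     if len(lvls) == 0 or min(lvls) < 0:
--         # at least one level is unknown
--         return -1
--     else:
--         # return the greatest level among the input nodes + 1
--         return max(lvls) + 1
-- ===== SOURCE B (Python) =====
-- def get_node_level(levelization_dict, input_nodes):
--     # Single short-circuiting pass: running max of input levels; any unknown level returns -1 immediately.
--     mx = -1
--     for input_node in input_nodes:
--         lvl = levelization_dict.get(input_node, -1)
--         if lvl < 0:
--             return -1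
--         if lvl > mx:
--             mx = lvl
--     return -1 if mx < 0 else mx + 1
-- ===== Notes on version B (the rewrite author's own statement) =====
-- stated objective: faster
-- what changed: Fuses A's build-a-levels-list plus separate min scan and max scan into one short-circuiting loop keeping only a running maximum, returning -1 as soon as an unknown (negative) level is seen.
import Mathlib
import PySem

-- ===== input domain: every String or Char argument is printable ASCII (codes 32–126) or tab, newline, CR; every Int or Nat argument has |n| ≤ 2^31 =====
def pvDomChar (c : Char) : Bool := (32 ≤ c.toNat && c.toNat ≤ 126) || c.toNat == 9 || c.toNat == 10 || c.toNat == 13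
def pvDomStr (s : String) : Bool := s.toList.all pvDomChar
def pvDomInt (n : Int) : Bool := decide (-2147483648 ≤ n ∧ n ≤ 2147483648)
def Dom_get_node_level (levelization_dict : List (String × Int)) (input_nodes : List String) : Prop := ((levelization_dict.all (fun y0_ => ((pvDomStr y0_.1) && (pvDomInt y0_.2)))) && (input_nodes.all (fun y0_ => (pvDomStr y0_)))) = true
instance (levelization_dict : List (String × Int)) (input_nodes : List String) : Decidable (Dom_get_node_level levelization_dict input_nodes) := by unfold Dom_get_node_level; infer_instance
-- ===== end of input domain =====

-- B fuses A's build-a-levels-list + min scan + max scan into one short-circuiting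
-- running-max loop; same return value everywhere (objective: faster, constant-factor).

-- ===== PORT A =====
-- lvls built by the loop, then the len/min test, then max + 1, as in A.
def get_node_level (levelization_dict : List (String × Int)) (input_nodes : List String) : Int :=
  let d := PySem.Dict.mk levelization_dict
  let lvls := input_nodes.foldl (fun acc input_node =>
    if d.contains input_node then acc ++ [((d.get? input_node).getD 0)]  -- getD 0 unreachable: contains holds
    else acc ++ [(-1)]) []
  if lvls.length = 0 ∨ ((PySem.List.min? lvls (fun x => x)).getD 0 < 0) then -1
  else ((PySem.List.max? lvls (fun x => x)).getD 0) + 1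

-- ===== PORT B =====
def altLoop (d : PySem.Dict String Int) : List String → Int → Int
  | [], mx => if mx < 0 then -1 else mx + 1
  | input_node :: rest, mx =>
    let lvl := d.getD input_node (-1)
    if lvl < 0 then -1
    else altLoop d rest (if mx < lvl then lvl else mx)

def get_node_level_alt (levelization_dict : List (String × Int)) (input_nodes : List String) : Int :=
  altLoop (PySem.Dict.mk levelization_dict) input_nodes (-1)

-- ===== PRECONDITION & SPEC =====
def Spec_get_node_level (levelization_dict : List (String × Int)) (input_nodes : List String) (out : Int) : Prop := out = get_node_level_alt levelization_dict input_nodes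
instance (levelization_dict : List (String × Int)) (input_nodes : List String) (out : Int) : Decidable (Spec_get_node_level levelization_dict input_nodes out) := by unfold Spec_get_node_level; infer_instance

-- ===== CLAIM (what is proved, stated in full; the proofs are below) =====
def Claim_equal_get_node_level : Prop := ∀ (levelization_dict : List (String × Int)) (input_nodes : List String), Dom_get_node_level levelization_dict input_nodes → Spec_get_node_level levelization_dict input_nodes (get_node_level levelization_dict input_nodes)

-- ===== LEMMAS AND PROOFS =====

-- A's built list is the map of getD (-1): the two branches coincide with getD (-1).
lemma lvls_eq_map (d : PySem.Dict String Int) (ns : List String) (acc : List Int) :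
    ns.foldl (fun acc input_node =>
      if d.contains input_node then acc ++ [((d.get? input_node).getD 0)]
      else acc ++ [(-1)]) acc
    = acc ++ ns.map (fun n => d.getD n (-1)) := by
  induction ns generalizing acc with
  | nil => simp
  | cons n t ih =>
    simp only [List.foldl_cons, List.map_cons]
    rw [ih]
    rw [PySem.Dict.contains_eq_isSome_get?]
    cases hg : PySem.Dict.get? d n with
    | none => simp [PySem.Dict.getD, hg]
    | some v => simp [PySem.Dict.getD, hg]

-- altLoop characterised: short-circuit on any negative level, else running max.
lemma altLoop_char (d : PySem.Dict String Int) (ns : List String) (mx : Int) :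
    altLoop d ns mx =
      if ns.any (fun n => decide (d.getD n (-1) < 0)) then -1
      else (let m := (ns.map (fun n => d.getD n (-1))).foldl max mx;
            if m < 0 then -1 else m + 1) := by
  induction ns generalizing mx with
  | nil => simp [altLoop]
  | cons n t ih =>
    by_cases h : d.getD n (-1) < 0
    · simp [altLoop, h]
    · simp only [altLoop, if_neg h, List.any_cons, List.map_cons, List.foldl_cons]
      rw [ih]
      have hm : (if mx < d.getD n (-1) then d.getD n (-1) else mx) = max mx (d.getD n (-1)) := by
        rw [max_def]; split_ifs <;> omega
      simp [h, hm]

-- ===== VERDICT (by name: the statement is the Claim_ definition above) =====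
theorem get_node_level_spec : Claim_equal_get_node_level := by
  intro levelization_dict input_nodes _
  unfold Spec_get_node_level get_node_level get_node_level_alt
  dsimp only
  rw [lvls_eq_map, altLoop_char]
  simp only [List.nil_append]
  set d := PySem.Dict.mk levelization_dict with hd
  set f : String → Int := fun n => d.getD n (-1) with hf
  cases input_nodes with
  | nil => simp
  | cons n t =>
    by_cases hneg : (n :: t).any (fun x => decide (f x < 0))
    · -- some level is negative: both return -1
      rw [if_pos hneg]
      obtain ⟨x, hx, hxneg⟩ := List.any_eq_true.mp hneg
      simp only [decide_eq_true_eq] at hxneg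
      have hmin : PySem.List.min? ((n :: t).map f) (fun y => y) =
          some ((t.map f).foldl min (f n)) := by
        simpa using PySem.List.min?_id_cons (f n) (t.map f)
      have hle : (t.map f).foldl min (f n) ≤ f x := by
        have := PySem.List.min?_isMin hmin (f x) (List.mem_map_of_mem hx)
        simpa using this
      rw [if_pos]
      right
      rw [hmin]
      simp only [Option.getD_some]
      omega
    · -- no negative level
      rw [if_neg hneg]
      have hall : ∀ x ∈ n :: t, 0 ≤ f x := by
        intro x hx
        by_contra hc
        exact hneg (List.any_eq_true.mpr ⟨x, hx, by simp only [decide_eq_true_eq]; omega⟩)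
      have hfn : 0 ≤ f n := hall n (by simp)
      have hmin : PySem.List.min? ((n :: t).map f) (fun y => y) =
          some ((t.map f).foldl min (f n)) := by
        simpa using PySem.List.min?_id_cons (f n) (t.map f)
      have hmax : PySem.List.max? ((n :: t).map f) (fun y => y) =
          some ((t.map f).foldl max (f n)) := by
        simpa using PySem.List.max?_id_cons (f n) (t.map f)
      have hminmem : (t.map f).foldl min (f n) ∈ (n :: t).map f :=
        PySem.List.min?_mem hmin
      have hmin0 : 0 ≤ (t.map f).foldl min (f n) := by
        obtain ⟨x, hx, hxe⟩ := List.mem_map.mp hminmem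
        exact hxe ▸ hall x hx
      have hmaxge : f n ≤ (t.map f).foldl max (f n) :=
        (PySem.List.le_foldl_max (t.map f) (f n)).1
      rw [if_neg (by rw [hmin]; simp; omega)]
      rw [hmax]
      have hstart : max (-1 : Int) (f n) = f n := by rw [max_def]; split_ifs <;> omega
      simp only [List.map_cons, List.foldl_cons, hstart, Option.getD_some]
      rw [if_neg (by omega)]
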